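-- pv_equiv track=rewrite | github.com/martijnbentum/astla-turbo | utils/jasmin_align.py | _make_index_mapping_aligned_text
-- ===== SOURCE A (Python) =====
-- def _make_index_mapping_aligned_text(aligned_text):
--     '''maps indices from not aligned text to aligned text.
--     aligned text contains - characters to align a text with another text
--     that containes more/differenct characters at a given location.
--     '''
--     output = []
--     no_underscore_index = 0
--     text_to_aligned = {}
--     aligned_to_text = {}
--     for i,char in enumerate(aligned_text):
--         if char == '-': continue
--         output.append({'aligned_text':i,'text':no_underscore_index})
--         text_to_aligned[no_underscore_index] = i
--         aligned_to_text[i] = no_underscore_index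
--         no_underscore_index += 1
--     return output, aligned_to_text, text_to_aligned
-- ===== SOURCE B (Python) =====
-- def _make_index_mapping_aligned_text(aligned_text):
--     '''maps indices from not aligned text to aligned text.
--     aligned text contains - characters to align a text with another text
--     that containes more/differenct characters at a given location.
--     '''
--     pairs = []
--     a = t = 0
--     for seg in aligned_text.split('-'):
--         pairs.extend((a + k, t + k) for k, _ in enumerate(seg))
--         a += len(seg) + 1
--         t += len(seg)
--     output = [{'aligned_text': i, 'text': j} for i, j in pairs]
--     aligned_to_text = dict(pairs)
--     text_to_aligned = {j: i for i, j in pairs}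
--     return output, aligned_to_text, text_to_aligned
-- ===== Notes on version B (the rewrite author's own statement) =====
-- stated objective: alternative
-- what changed: Instead of scanning characters with a threaded non-dash counter, B splits the text on '-' into dash-free segments and reconstructs the (aligned,text) index pairs from per-segment offsets by arithmetic (aligned offset advances by len(seg)+1, text offset by len(seg)), then derives the list and both dicts from that one pair list.
import Mathlib
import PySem

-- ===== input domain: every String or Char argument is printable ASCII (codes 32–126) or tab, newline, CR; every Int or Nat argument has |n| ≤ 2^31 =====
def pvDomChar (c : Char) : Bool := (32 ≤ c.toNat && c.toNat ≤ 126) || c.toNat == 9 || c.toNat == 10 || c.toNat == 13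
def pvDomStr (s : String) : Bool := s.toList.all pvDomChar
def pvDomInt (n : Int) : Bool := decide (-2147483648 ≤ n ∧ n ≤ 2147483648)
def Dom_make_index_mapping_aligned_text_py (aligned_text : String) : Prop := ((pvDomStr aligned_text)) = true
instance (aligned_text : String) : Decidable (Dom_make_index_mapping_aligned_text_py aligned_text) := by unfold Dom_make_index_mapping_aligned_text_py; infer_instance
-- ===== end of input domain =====

-- B replaces A's character scan with a threaded non-dash counter by splitting the text on
-- '-' into dash-free segments and rebuilding the (aligned, text) index pairs from per-segment
-- offsets, deriving the output list and both dicts from that one pair list (objective: alternative).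

-- ===== PORT A =====
-- A's loop state: (output, no_underscore_index, text_to_aligned, aligned_to_text)
def pvAState := (List (List (String × Int))) × Int × PySem.Dict Int Int × PySem.Dict Int Int

def pvAStep (st : pvAState) (p : Int × Char) : pvAState :=
  if p.2 = '-' then st
  else (st.1 ++ [[("aligned_text", p.1), ("text", st.2.1)]],
        st.2.1 + 1,
        st.2.2.1.insert st.2.1 p.1,
        st.2.2.2.insert p.1 st.2.1)

def make_index_mapping_aligned_text_py (aligned_text : String) : (List (List (String × Int))) × (List (Int × Int)) × (List (Int × Int)) :=
  let st := (PySem.List.enumerate aligned_text.toList).foldl pvAStep ([], 0, PySem.Dict.empty, PySem.Dict.empty)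
  (st.1, st.2.2.2.items, st.2.2.1.items)

-- ===== PORT B =====
-- B's segment step: state (pairs, a, t); for each dash-free segment append its index pairs
-- and advance the aligned offset by len(seg) + 1, the text offset by len(seg)
def pvBStep (st : (List (Int × Int)) × Int × Int) (seg : List Char) : (List (Int × Int)) × Int × Int :=
  (st.1 ++ (PySem.List.enumerate seg 0).map (fun q => (st.2.1 + q.1, st.2.2 + q.1)),
   st.2.1 + (seg.length : Int) + 1,
   st.2.2 + (seg.length : Int))

def make_index_mapping_aligned_text_py_alt (aligned_text : String) : (List (List (String × Int))) × (List (Int × Int)) × (List (Int × Int)) :=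
  let st := (PySem.Chars.splitOn aligned_text.toList ['-']).foldl pvBStep ([], 0, 0)
  let pairs := st.1
  let output := pairs.map (fun p => [("aligned_text", p.1), ("text", p.2)])
  let aligned_to_text := (pairs.foldl (fun d (p : Int × Int) => d.insert p.1 p.2) PySem.Dict.empty).items
  let text_to_aligned := (pairs.foldl (fun d (p : Int × Int) => d.insert p.2 p.1) PySem.Dict.empty).items
  (output, aligned_to_text, text_to_aligned)

-- ===== PRECONDITION & SPEC =====
def Spec_make_index_mapping_aligned_text_py (aligned_text : String) (out : (List (List (String × Int))) × (List (Int × Int)) × (List (Int × Int))) : Prop := out = make_index_mapping_aligned_text_py_alt aligned_text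
instance (aligned_text : String) (out : (List (List (String × Int))) × (List (Int × Int)) × (List (Int × Int))) : Decidable (Spec_make_index_mapping_aligned_text_py aligned_text out) := by unfold Spec_make_index_mapping_aligned_text_py; infer_instance

-- ===== CLAIM (what is proved, stated in full; the proofs are below) =====
def Claim_equal_make_index_mapping_aligned_text_py : Prop := ∀ (aligned_text : String), Dom_make_index_mapping_aligned_text_py aligned_text → Spec_make_index_mapping_aligned_text_py aligned_text (make_index_mapping_aligned_text_py aligned_text)

-- ===== LEMMAS AND PROOFS =====

-- the non-dash positions of l, indices starting at i
def pvPos (l : List Char) (i : Int) : List Int :=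
  ((PySem.List.enumerate l i).filter (fun p => p.2 != '-')).map (·.1)

theorem pvPos_cons_dash (l : List Char) (i : Int) :
    pvPos ('-' :: l) i = pvPos l (i + 1) := by
  simp [pvPos, PySem.List.enumerate_cons]

theorem pvPos_cons_ne (c : Char) (l : List Char) (i : Int) (h : ¬ c = '-') :
    pvPos (c :: l) i = i :: pvPos l (i + 1) := by
  simp [pvPos, PySem.List.enumerate_cons, h]

theorem pvPos_append (xs ys : List Char) (a : Int) :
    pvPos (xs ++ ys) a = pvPos xs a ++ pvPos ys (a + xs.length) := by
  induction xs generalizing a with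
  | nil => simp [pvPos, PySem.List.enumerate_nil]
  | cons c xs ih =>
      by_cases hc : c = '-'
      · subst hc
        rw [List.cons_append, pvPos_cons_dash, pvPos_cons_dash, ih]
        congr 2
        simp only [List.length_cons]; push_cast; ring
      · rw [List.cons_append, pvPos_cons_ne c _ a hc, pvPos_cons_ne c xs a hc, ih,
            List.cons_append]
        congr 3
        simp only [List.length_cons]; push_cast; ring

theorem pvPos_length_dashFree (cs : List Char) (a : Int) (h : ∀ c ∈ cs, c ≠ '-') :
    (pvPos cs a).length = cs.length := by
  induction cs generalizing a with
  | nil => simp [pvPos, PySem.List.enumerate_nil]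
  | cons c cs ih =>
      rw [pvPos_cons_ne c cs a (h c (List.mem_cons_self))]
      simp [ih (a + 1) (fun x hx => h x (List.mem_cons_of_mem c hx))]

theorem pvPos_pairwise (l : List Char) (a : Int) :
    (pvPos l a).Pairwise (· < ·) := by
  have := (PySem.List.pairwise_lt_enumerate l a).filter (fun p => p.2 != '-')
  simpa [pvPos, List.pairwise_map] using this

-- a dash-free block contributes consecutive (aligned, text) pairs
theorem pvSegPairs (cs : List Char) (h : ∀ c ∈ cs, c ≠ '-') :
    ∀ (a t s : Int),
    (PySem.List.enumerate (pvPos cs (a + s)) (t + s)).map (fun q => (q.2, q.1))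
      = (PySem.List.enumerate cs s).map (fun q => (a + q.1, t + q.1)) := by
  induction cs with
  | nil => intro a t s; simp [pvPos, PySem.List.enumerate_nil]
  | cons c cs ih =>
      intro a t s
      rw [pvPos_cons_ne c cs (a + s) (h c (List.mem_cons_self)),
          PySem.List.enumerate_cons, PySem.List.enumerate_cons]
      have hih := ih (fun x hx => h x (List.mem_cons_of_mem c hx)) a t (s + 1)
      rw [List.map_cons, List.map_cons]
      have e1 : a + s + 1 = a + (s + 1) := by ring
      have e2 : t + s + 1 = t + (s + 1) := by ring
      rw [e1, e2, hih]

theorem pvSegPairs0 (cs : List Char) (h : ∀ c ∈ cs, c ≠ '-') (a t : Int) :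
    (PySem.List.enumerate (pvPos cs a) t).map (fun q => (q.2, q.1))
      = (PySem.List.enumerate cs 0).map (fun q => (a + q.1, t + q.1)) := by
  have := pvSegPairs cs h a t 0
  simpa using this

-- reference form of splitOn '-' used by the proofs
def pvSegs : List Char → List Char → List (List Char)
  | [], cur => [cur.reverse]
  | c :: rest, cur => if c = '-' then cur.reverse :: pvSegs rest [] else pvSegs rest (c :: cur)

theorem pvGo_eq (l : List Char) : ∀ (cur : List Char) (acc : List (List Char)) (fuel : Nat),
    l.length < fuel →
    PySem.Chars.splitOn.go ['-'] fuel l cur acc = acc.reverse ++ pvSegs l cur := by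
  induction l with
  | nil =>
      intro cur acc fuel hf
      cases fuel with
      | zero => omega
      | succ f => simp [PySem.Chars.splitOn.go, pvSegs]
  | cons c rest ih =>
      intro cur acc fuel hf
      cases fuel with
      | zero => simp at hf
      | succ f =>
          by_cases hc : c = '-'
          · subst hc
            rw [PySem.Chars.splitOn.go]
            simp only [List.isPrefixOf, BEq.rfl, Bool.true_and]
            rw [if_pos (by simp)]
            simp only [List.length_cons, List.length_nil, List.drop_succ_cons, List.drop_zero]
            rw [ih [] (cur.reverse :: acc) f (by simp at hf; omega)]
            simp [pvSegs]
          · rw [PySem.Chars.splitOn.go]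
            have hpre : (['-'].isPrefixOf (c :: rest)) = false := by
              simp [List.isPrefixOf]
              exact fun h => (hc h.symm).elim
            rw [if_neg (by simp [hpre]), ih (c :: cur) acc f (by simp at hf; omega)]
            simp [pvSegs, hc]

theorem pvSplitOn_eq (l : List Char) :
    PySem.Chars.splitOn l ['-'] = pvSegs l [] := by
  have := pvGo_eq l [] [] (l.length + 1) (by omega)
  simpa [PySem.Chars.splitOn] using this

-- B's segment loop, run from a general state
theorem pvBLoop (l : List Char) : ∀ (cur : List Char), (∀ c ∈ cur, c ≠ '-') →
    ∀ (a t : Int) (pairs : List (Int × Int)),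
    (pvSegs l cur).foldl pvBStep (pairs, a, t)
      = (pairs ++ (PySem.List.enumerate (pvPos (cur.reverse ++ l) a) t).map (fun q => (q.2, q.1)),
         a + cur.length + l.length + 1,
         t + ((pvPos (cur.reverse ++ l) a).length : Int)) := by
  induction l with
  | nil =>
      intro cur hcur a t pairs
      have hrev : ∀ c ∈ cur.reverse, c ≠ '-' := fun c hc => hcur c (List.mem_reverse.mp hc)
      simp only [pvSegs, List.foldl_cons, List.foldl_nil, List.append_nil, pvBStep]
      rw [pvSegPairs0 cur.reverse hrev a t, pvPos_length_dashFree cur.reverse a hrev]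
      simp
  | cons c rest ih =>
      intro cur hcur a t pairs
      by_cases hc : c = '-'
      · subst hc
        have hrev : ∀ x ∈ cur.reverse, x ≠ '-' := fun x hx => hcur x (List.mem_reverse.mp hx)
        rw [show pvSegs ('-' :: rest) cur = cur.reverse :: pvSegs rest [] from by simp [pvSegs]]
        simp only [List.foldl_cons, pvBStep, List.length_reverse]
        rw [ih [] (by simp) (a + ↑cur.length + 1) (t + ↑cur.length) _]
        rw [pvPos_append cur.reverse ('-' :: rest) a, List.length_reverse,
            pvPos_cons_dash rest (a + (cur.length : Int))]
        rw [PySem.List.enumerate_append, List.map_append]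
        rw [pvSegPairs0 cur.reverse hrev a t]
        simp only [pvPos_length_dashFree cur.reverse a hrev]
        simp only [List.length_reverse, List.nil_append, List.length_cons, List.length_append,
          Prod.mk.injEq, List.reverse_nil, List.length_nil]
        refine ⟨?_, ?_, ?_⟩
        · rw [List.append_assoc]
        · push_cast; ring
        · simp only [pvPos_length_dashFree cur.reverse a hrev, List.length_reverse]
          push_cast; ring
      · rw [show pvSegs (c :: rest) cur = pvSegs rest (c :: cur) from by simp [pvSegs, hc]]
        rw [ih (c :: cur)
          (fun x hx => by rcases List.mem_cons.mp hx with h | h; exacts [h ▸ hc, hcur x h]) a t pairs]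
        have hl : (c :: cur).reverse ++ rest = cur.reverse ++ c :: rest := by simp
        rw [hl]
        simp only [List.length_cons, Prod.mk.injEq, true_and, and_true]
        push_cast; ring

-- folding insert over pairwise-fresh keys just appends the pairs
theorem pvFoldInsert (ps : List (Int × Int)) : ∀ (d : PySem.Dict Int Int),
    (∀ p ∈ ps, d.contains p.1 = false) → ps.Pairwise (fun p q => p.1 ≠ q.1) →
    (ps.foldl (fun d (p : Int × Int) => d.insert p.1 p.2) d).items = d.items ++ ps := by
  induction ps with
  | nil => intro d _ _; simp
  | cons p ps ih =>
      intro d h hpw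
      rcases List.pairwise_cons.mp hpw with ⟨hhd, htl⟩
      rw [List.foldl_cons,
          ih (d.insert p.1 p.2)
            (by intro q hq
                rw [PySem.Dict.contains_insert]
                have h1 : (q.1 == p.1) = false := by
                  simp; exact fun h' => (hhd q hq h'.symm).elim
                simp [h1, h q (List.mem_cons_of_mem p hq)])
            htl,
          PySem.Dict.items_insert_of_not_contains d p.2 (h p List.mem_cons_self)]
      simp

-- A's loop, run from a general state, produces the enumerated non-dash positions
theorem pvALoop (l : List Char) (i n : Int) (out : List (List (String × Int)))
    (d1 d2 : PySem.Dict Int Int)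
    (h1 : ∀ k : Int, n ≤ k → d1.contains k = false)
    (h2 : ∀ k : Int, i ≤ k → d2.contains k = false) :
    (PySem.List.enumerate l i).foldl pvAStep (out, n, d1, d2) =
      (out ++ (PySem.List.enumerate (pvPos l i) n).map
                (fun q => [("aligned_text", q.2), ("text", q.1)]),
       n + (pvPos l i).length,
       PySem.Dict.mk (d1.items ++ (PySem.List.enumerate (pvPos l i) n).map (fun q => (q.1, q.2))),
       PySem.Dict.mk (d2.items ++ (PySem.List.enumerate (pvPos l i) n).map (fun q => (q.2, q.1)))) := by
  induction l generalizing i n out d1 d2 with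
  | nil =>
      simp [pvPos, PySem.List.enumerate_nil]
  | cons c l ih =>
      rw [PySem.List.enumerate_cons, List.foldl_cons]
      by_cases hc : c = '-'
      · subst hc
        have hstep : pvAStep (out, n, d1, d2) ((i, '-') : Int × Char) = (out, n, d1, d2) := by
          simp [pvAStep]
        rw [hstep, pvPos_cons_dash,
            ih (i + 1) n out d1 d2 h1 (fun k hk => h2 k (by omega))]
      · have hstep : pvAStep (out, n, d1, d2) ((i, c) : Int × Char) =
            (out ++ [[("aligned_text", i), ("text", n)]], n + 1, d1.insert n i, d2.insert i n) := by
          simp [pvAStep, hc]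
        have h1' : ∀ k : Int, n + 1 ≤ k → (d1.insert n i).contains k = false := by
          intro k hk
          rw [PySem.Dict.contains_insert]
          have : (k == n) = false := by simp; omega
          simp [this, h1 k (by omega)]
        have h2' : ∀ k : Int, i + 1 ≤ k → (d2.insert i n).contains k = false := by
          intro k hk
          rw [PySem.Dict.contains_insert]
          have : (k == i) = false := by simp; omega
          simp [this, h2 k (by omega)]
        rw [hstep, ih (i + 1) (n + 1) _ _ _ h1' h2',
            pvPos_cons_ne c l i hc]
        have hd1 : (d1.insert n i).items = d1.items ++ [(n, i)] :=
          PySem.Dict.items_insert_of_not_contains d1 i (h1 n (le_refl n))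
        have hd2 : (d2.insert i n).items = d2.items ++ [(i, n)] :=
          PySem.Dict.items_insert_of_not_contains d2 n (h2 i (le_refl i))
        simp [PySem.List.enumerate_cons, hd1, hd2]
        ring_nf

-- ===== VERDICT (by name: the statement is the Claim_ definition above) =====
theorem make_index_mapping_aligned_text_py_spec : Claim_equal_make_index_mapping_aligned_text_py := by
  intro s _
  unfold Spec_make_index_mapping_aligned_text_py
  unfold make_index_mapping_aligned_text_py make_index_mapping_aligned_text_py_alt
  rw [pvALoop s.toList 0 0 [] PySem.Dict.empty PySem.Dict.empty
        (fun k _ => PySem.Dict.contains_empty k) (fun k _ => PySem.Dict.contains_empty k)]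
  rw [pvSplitOn_eq s.toList, pvBLoop s.toList [] (by simp) 0 0 []]
  simp only [List.reverse_nil, List.nil_append]
  set E := PySem.List.enumerate (pvPos s.toList 0) 0 with hE
  have hpwE : E.Pairwise (fun p q => p.1 < q.1) := PySem.List.pairwise_lt_enumerate _ 0
  have hpwX : E.Pairwise (fun p q => p.2 < q.2) := by
    have := pvPos_pairwise s.toList 0
    rw [← PySem.List.map_snd_enumerate (pvPos s.toList 0) 0, List.pairwise_map] at this
    exact this
  have hpairs : ∀ q ∈ E.map (fun q : Int × Int => (q.2, q.1)), (PySem.Dict.empty : PySem.Dict Int Int).contains q.1 = false :=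
    fun q _ => PySem.Dict.contains_empty q.1
  -- aligned_to_text: keys are the aligned positions, pairwise distinct
  have hfold1 : ((E.map (fun q : Int × Int => (q.2, q.1))).foldl
      (fun d (p : Int × Int) => d.insert p.1 p.2) PySem.Dict.empty).items
      = E.map (fun q : Int × Int => (q.2, q.1)) := by
    rw [pvFoldInsert _ PySem.Dict.empty hpairs
        (by rw [List.pairwise_map]; exact hpwX.imp (fun h => ne_of_lt h))]
    simp [PySem.Dict.empty]
  -- text_to_aligned: fold inserting swapped components = fold over the swapped list
  have hfold2 : ((E.map (fun q : Int × Int => (q.2, q.1))).foldl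
      (fun d (p : Int × Int) => d.insert p.2 p.1) PySem.Dict.empty).items = E := by
    have hmm : (E.map (fun q : Int × Int => (q.2, q.1))).foldl
        (fun d (p : Int × Int) => d.insert p.2 p.1) PySem.Dict.empty
        = E.foldl (fun d (p : Int × Int) => d.insert p.1 p.2) PySem.Dict.empty := by
      rw [List.foldl_map]
    rw [hmm, pvFoldInsert E PySem.Dict.empty (fun q _ => PySem.Dict.contains_empty q.1)
        (hpwE.imp (fun h => ne_of_lt h))]
    simp [PySem.Dict.empty]
  simp only [hfold1, hfold2, Prod.mk.injEq]
  refine ⟨?_, ?_, ?_⟩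
  · rw [List.map_map]
    rfl
  · simp [PySem.Dict.empty]
  · simp [PySem.Dict.empty]
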